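-- pv_equiv track=rewrite | github.com/ODBapp/odbchat | server/rag/onepass_core.py | _query_is_meaningful
-- ===== SOURCE A (Python) =====
-- def _is_cjk(ch: str) -> bool:
--     return "\u4e00" <= ch <= "\u9fff"
--
-- def _query_is_meaningful(query: str) -> bool:
--     if not query or not query.strip():
--         return False
--     meaningful = sum(1 for ch in query if ch.isalnum() or _is_cjk(ch))
--     if meaningful < 2:
--         return False
--     condensed = "".join(ch for ch in query if not ch.isspace())
--     if condensed and len(set(condensed)) <= 1:
--         return False
--     return True
-- ===== SOURCE B (Python) =====
-- def _is_cjk(ch: str) -> bool: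
--     return "\u4e00" <= ch <= "\u9fff"
--
-- def _query_is_meaningful(query: str) -> bool:
--     # One pass: count meaningful chars, track the first non-space char and
--     # whether any later non-space char differs from it.
--     meaningful = 0
--     first = None
--     distinct = False
--     for ch in query:
--         if ch.isalnum() or _is_cjk(ch):
--             meaningful += 1
--         if not ch.isspace():
--             if first is None:
--                 first = ch
--             elif ch != first:
--                 distinct = True
--     if first is None:
--         return False
--     if meaningful < 2:
--         return False
--     if not distinct:
--         return False
--     return True
-- ===== Notes on version B (the rewrite author's own statement) =====
-- stated objective: alternative
-- what changed: B replaces A's four separate passes (strip test, counting pass, filtering pass, set build) with one fused fold that counts meaningful characters and tracks the first non-space character plus a flag whether a later different non-space character appeared, so no intermediate string or set is built.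
import Mathlib
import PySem

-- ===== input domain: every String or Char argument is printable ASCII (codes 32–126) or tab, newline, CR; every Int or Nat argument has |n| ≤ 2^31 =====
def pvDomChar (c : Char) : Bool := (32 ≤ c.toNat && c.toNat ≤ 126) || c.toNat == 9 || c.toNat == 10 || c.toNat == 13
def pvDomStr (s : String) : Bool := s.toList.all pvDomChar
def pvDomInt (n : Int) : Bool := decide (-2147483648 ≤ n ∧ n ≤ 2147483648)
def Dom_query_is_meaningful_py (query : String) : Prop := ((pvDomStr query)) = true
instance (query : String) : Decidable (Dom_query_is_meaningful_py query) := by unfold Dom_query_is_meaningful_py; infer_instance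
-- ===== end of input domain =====

-- B fuses A's four sequential passes (strip test, counting pass, filter, set build)
-- into one fold that counts meaningful chars and tracks the first non-space char
-- plus a flag whether a later different non-space char appeared; no intermediate string or set.

-- ===== PORT A =====
-- helper _is_cjk, shared by both Pythons (single-char string comparison = code-point comparison)
def pyIsCjk (ch : Char) : Bool := decide ((0x4e00 : Nat) ≤ ch.toNat) && decide (ch.toNat ≤ 0x9fff)

def query_is_meaningful_py (query : String) : Bool :=
  let cs := query.toList
  if cs = [] ∨ PySem.Chars.strip cs = [] then false
  else
    let meaningful := cs.countP (fun ch => PySem.Chars.isalnum ch || pyIsCjk ch)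
    if meaningful < 2 then false
    else
      let condensed := cs.filter (fun ch => !PySem.Chars.isspace ch)
      if condensed ≠ [] ∧ (PySem.Set.ofList condensed).length ≤ 1 then false
      else true

-- ===== PORT B =====
-- one step of B's loop: state = (meaningful count, first non-space char seen, distinct flag)
def pyAltStep (st : Nat × Option Char × Bool) (ch : Char) : Nat × Option Char × Bool :=
  let m := if PySem.Chars.isalnum ch || pyIsCjk ch then st.1 + 1 else st.1
  if !PySem.Chars.isspace ch then
    match st.2.1 with
    | none => (m, some ch, st.2.2)
    | some f => (m, some f, st.2.2 || decide (ch ≠ f))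
  else (m, st.2.1, st.2.2)

def query_is_meaningful_py_alt (query : String) : Bool :=
  let st := query.toList.foldl pyAltStep (0, none, false)
  match st.2.1 with
  | none => false
  | some _ => if st.1 < 2 then false else if !st.2.2 then false else true

-- ===== PRECONDITION & SPEC =====
def Spec_query_is_meaningful_py (query : String) (out : Bool) : Prop := out = query_is_meaningful_py_alt query
instance (query : String) (out : Bool) : Decidable (Spec_query_is_meaningful_py query out) := by unfold Spec_query_is_meaningful_py; infer_instance

-- ===== CLAIM (what is proved, stated in full; the proofs are below) =====
def Claim_equal_query_is_meaningful_py : Prop := ∀ (query : String), Dom_query_is_meaningful_py query → Spec_query_is_meaningful_py query (query_is_meaningful_py query)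

-- ===== LEMMAS AND PROOFS =====

-- the two character predicates of both programs, named for the proofs
def pvP (ch : Char) : Bool := PySem.Chars.isalnum ch || pyIsCjk ch
def pvQ (ch : Char) : Bool := !PySem.Chars.isspace ch

-- B's fold after the first non-space char f has been seen
theorem pvFold_some (cs : List Char) (m : Nat) (f : Char) (d : Bool) :
    cs.foldl pyAltStep (m, some f, d) =
      (m + cs.countP pvP, some f, d || cs.any (fun c => pvQ c && decide (c ≠ f))) := by
  induction cs generalizing m d with
  | nil => simp
  | cons c cs ih =>
    simp only [List.foldl_cons, pyAltStep, List.countP_cons, List.any_cons, pvP, pvQ]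
    by_cases hq : PySem.Chars.isspace c <;> by_cases hp : (PySem.Chars.isalnum c || pyIsCjk c) = true <;>
      simp [hq, hp, ih, Bool.or_assoc] <;> simp [pvQ] <;> omega

-- B's fold before any non-space char has been seen, characterised by the non-space filtrate
theorem pvFold_none (cs : List Char) (m : Nat) :
    cs.foldl pyAltStep (m, none, false) =
      (m + cs.countP pvP, (cs.filter pvQ).head?,
       match cs.filter pvQ with
       | [] => false
       | f :: t => t.any (fun c => decide (c ≠ f))) := by
  induction cs generalizing m with
  | nil => simp
  | cons c cs ih =>
    simp only [List.foldl_cons, pyAltStep, List.countP_cons, List.filter_cons, pvP, pvQ]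
    by_cases hq : PySem.Chars.isspace c <;> by_cases hp : (PySem.Chars.isalnum c || pyIsCjk c) = true
    · simp [hq, hp, ih]; omega
    · simp [hq, hp, ih]
    · simp only [hq, hp, Bool.not_false, if_true]
      rw [pvFold_some]
      simp [List.any_filter, pvQ]
      omega
    · simp only [hq, hp, Bool.not_false, if_true]
      rw [pvFold_some]
      simp [List.any_filter, pvQ]

-- strip is empty iff every character is whitespace iff the non-space filtrate is empty
theorem pvStrip_empty (cs : List Char) :
    (PySem.Chars.strip cs = []) ↔ cs.filter pvQ = [] := by
  simp [PySem.Chars.strip, PySem.Chars.rstrip, PySem.Chars.lstrip, List.filter_eq_nil_iff,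
    List.dropWhile_eq_nil_iff, pvQ]
  constructor
  · intro h x hx
    have hx' : x ∈ List.takeWhile PySem.Chars.isspace cs ++ List.dropWhile PySem.Chars.isspace cs := by
      rw [List.takeWhile_append_dropWhile]; exact hx
    rcases List.mem_append.1 hx' with h1 | h1
    · exact List.mem_takeWhile_imp h1
    · exact h x h1
  · intro h x hx
    exact h x ((List.dropWhile_sublist _).subset hx)

-- the deduplicated set of f :: t has at most one element iff every member of t equals f
theorem pvSet_le_one (f : Char) (t : List Char) :
    ((PySem.Set.ofList (f :: t)).length ≤ 1) ↔ ∀ c ∈ t, c = f := by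
  have hm : ∀ x, x ∈ PySem.Set.ofList (f :: t) ↔ x ∈ f :: t := fun x => PySem.Set.mem_ofList _ x
  have hnd := PySem.Set.nodup_ofList (f :: t)
  constructor
  · intro hlen c hc
    have hf : f ∈ PySem.Set.ofList (f :: t) := (hm f).2 (by simp)
    have hcs : c ∈ PySem.Set.ofList (f :: t) := (hm c).2 (by simp [hc])
    rcases hs : PySem.Set.ofList (f :: t) with _ | ⟨a, _ | ⟨b, r⟩⟩
    · rw [hs] at hf; simp at hf
    · rw [hs] at hf hcs; simp at hf hcs; rw [hcs, hf]
    · rw [hs] at hlen; simp at hlen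
  · intro h
    rcases hs : PySem.Set.ofList (f :: t) with _ | ⟨a, _ | ⟨b, r⟩⟩
    · simp
    · simp
    · exfalso
      have ha : a = f := by
        rcases List.mem_cons.1 ((hm a).1 (by rw [hs]; simp)) with h' | h'
        · exact h'
        · exact h a h'
      have hb : b = f := by
        rcases List.mem_cons.1 ((hm b).1 (by rw [hs]; simp)) with h' | h'
        · exact h'
        · exact h b h'
      rw [hs] at hnd
      simp [ha, hb] at hnd

-- ===== VERDICT (by name: the statement is the Claim_ definition above) =====
theorem query_is_meaningful_py_spec : Claim_equal_query_is_meaningful_py := by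
  intro query _
  show query_is_meaningful_py query = query_is_meaningful_py_alt query
  unfold query_is_meaningful_py query_is_meaningful_py_alt
  rw [pvFold_none]
  simp only [show (fun ch => !PySem.Chars.isspace ch) = pvQ from rfl,
             show (fun ch => PySem.Chars.isalnum ch || pyIsCjk ch) = pvP from rfl]
  rcases hf : query.toList.filter pvQ with _ | ⟨f, t⟩
  · have hs : PySem.Chars.strip query.toList = [] := (pvStrip_empty _).2 hf
    simp [hs]
  · have hs : ¬ (PySem.Chars.strip query.toList = []) := by
      rw [pvStrip_empty, hf]; simp
    have hne : query.toList ≠ [] := by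
      intro h; rw [h] at hf; simp at hf
    simp only [hne, hs, or_self, if_false, Nat.zero_add]
    by_cases hm : query.toList.countP pvP < 2
    · simp [hm]
    · simp only [hm, if_false]
      by_cases hone : ((PySem.Set.ofList (f :: t)).length ≤ 1)
      · have hall := (pvSet_le_one f t).1 hone
        simp [hone]
        intro c hc
        simp [hall c hc]
      · simp [hone]
        by_contra hno
        exact hone ((pvSet_le_one f t).2 (fun c hc => by
          by_contra hcf
          exact hno ⟨c, hc, hcf⟩))
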